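-- pv_equiv track=rewrite | github.com/akaszubski/autonomous-dev | plugins/autonomous-dev/hooks/unified_pre_tool.py | combine_decisions
-- ===== SOURCE A (Python) =====
-- from typing import Dict, Tuple, List
--
-- def combine_decisions(validators_results: List[Tuple[str, str, str]]) -> Tuple[str, str]:
--     """
--     Combine multiple validator decisions into single decision.
--
--     Decision Logic:
--     - If ANY validator returns "deny" → "deny" (block operation)
--     - If ALL validators return "allow" → "allow" (approve operation)
--     - Otherwise → "ask" (prompt user)
--
--     Args:
--         validators_results: List of (validator_name, decision, reason) tuples
--
--     Returns:
--         Tuple of (final_decision, combined_reason)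
--     """
--     decisions = []
--     reasons = []
--
--     for validator_name, decision, reason in validators_results:
--         decisions.append(decision)
--         reasons.append(f"[{validator_name}] {reason}")
--
--     # If ANY deny → deny
--     if "deny" in decisions:
--         deny_reasons = [r for v, d, r in validators_results if d == "deny"]
--         return ("deny", "; ".join(deny_reasons))
--
--     # If ALL allow → allow
--     if all(d == "allow" for d in decisions):
--         return ("allow", "; ".join(reasons))
--
--     # Otherwise → ask
--     ask_reasons = [r for v, d, r in validators_results if d == "ask"]
--     if ask_reasons:
--         return ("ask", "; ".join(ask_reasons))
--     else:
--         return ("ask", "; ".join(reasons))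
-- ===== SOURCE B (Python) =====
-- from typing import Dict, Tuple, List
--
-- def combine_decisions(validators_results: List[Tuple[str, str, str]]) -> Tuple[str, str]:
--     """Severity-lattice combination: the final decision is the maximum rank
--     (deny=3 > ask=2 > non-standard=1 > allow=0) and the reason is picked by
--     one dispatch on that maximum."""
--     def rank(d: str) -> int:
--         return {"deny": 3, "ask": 2, "allow": 0}.get(d, 1)
--
--     sev = max((rank(d) for _, d, _ in validators_results), default=0)
--     if sev == 3:
--         return ("deny", "; ".join(r for _, d, r in validators_results if d == "deny"))
--     if sev == 2:
--         return ("ask", "; ".join(r for _, d, r in validators_results if d == "ask"))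
--     decision = "allow" if sev == 0 else "ask"
--     return (decision, "; ".join(f"[{n}] {r}" for n, _, r in validators_results))
-- ===== Notes on version B (the rewrite author's own statement) =====
-- stated objective: alternative
-- what changed: B replaces A's bucket-then-cascade logic (build decision/reason lists, then membership test, all(), and filter re-scans) with a severity-lattice formulation: each decision maps to a numeric rank (deny=3, ask=2, other=1, allow=0), the final decision is the maximum rank, and the reason is produced by one dispatch on that maximum.
import Mathlib
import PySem

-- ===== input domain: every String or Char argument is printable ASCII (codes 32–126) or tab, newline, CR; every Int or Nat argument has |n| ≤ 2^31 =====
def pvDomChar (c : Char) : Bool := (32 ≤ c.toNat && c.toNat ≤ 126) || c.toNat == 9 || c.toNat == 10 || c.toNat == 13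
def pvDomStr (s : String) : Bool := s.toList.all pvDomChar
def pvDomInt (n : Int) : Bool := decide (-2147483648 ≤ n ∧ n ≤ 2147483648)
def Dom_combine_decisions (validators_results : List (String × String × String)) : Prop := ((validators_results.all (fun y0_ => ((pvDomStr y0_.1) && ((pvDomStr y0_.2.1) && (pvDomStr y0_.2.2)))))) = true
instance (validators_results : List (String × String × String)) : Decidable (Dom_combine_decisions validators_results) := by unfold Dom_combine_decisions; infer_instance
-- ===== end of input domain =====

-- B decides by a severity lattice (decision = max of numeric ranks deny=3>ask=2>other=1>allow=0,
-- reason chosen by one dispatch on that maximum) instead of A's bucket lists and priority cascade; objective: alternative.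


-- ===== PORT A =====
def combine_decisions (validators_results : List (String × String × String)) : String × String :=
  -- the loop: decisions.append(decision); reasons.append(f"[{name}] {reason}")
  let st := validators_results.foldl
    (fun (acc : List String × List String) t =>
      (acc.1 ++ [t.2.1], acc.2 ++ ["[" ++ t.1 ++ "] " ++ t.2.2])) ([], [])
  let decisions := st.1
  let reasons := st.2
  if decisions.contains "deny" then
    let deny_reasons := (validators_results.filter (fun t => t.2.1 == "deny")).map (fun t => t.2.2)
    ("deny", PySem.Str.join "; " deny_reasons)
  else if decisions.all (fun d => d == "allow") then
    ("allow", PySem.Str.join "; " reasons)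
  else
    let ask_reasons := (validators_results.filter (fun t => t.2.1 == "ask")).map (fun t => t.2.2)
    if ask_reasons ≠ [] then
      ("ask", PySem.Str.join "; " ask_reasons)
    else
      ("ask", PySem.Str.join "; " reasons)

-- ===== PORT B =====
-- {"deny": 3, "ask": 2, "allow": 0}.get(d, 1), written as the literal lookup
def pvRank (d : String) : Nat :=
  if d == "deny" then 3 else if d == "ask" then 2 else if d == "allow" then 0 else 1

def combine_decisions_alt (validators_results : List (String × String × String)) : String × String :=
  -- sev = max((rank(d) for _, d, _ in validators_results), default=0)
  let sev := (validators_results.map (fun t => pvRank t.2.1)).foldr Nat.max 0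
  if sev == 3 then
    ("deny", PySem.Str.join "; " ((validators_results.filter (fun t => t.2.1 == "deny")).map (fun t => t.2.2)))
  else if sev == 2 then
    ("ask", PySem.Str.join "; " ((validators_results.filter (fun t => t.2.1 == "ask")).map (fun t => t.2.2)))
  else
    let decision := if sev == 0 then "allow" else "ask"
    (decision, PySem.Str.join "; " (validators_results.map (fun t => "[" ++ t.1 ++ "] " ++ t.2.2)))

-- ===== PRECONDITION & SPEC =====
def Spec_combine_decisions (validators_results : List (String × String × String)) (out : String × String) : Prop := out = combine_decisions_alt validators_results
instance (validators_results : List (String × String × String)) (out : String × String) : Decidable (Spec_combine_decisions validators_results out) := by unfold Spec_combine_decisions; infer_instance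

-- ===== CLAIM (what is proved, stated in full; the proofs are below) =====
def Claim_equal_combine_decisions : Prop := ∀ (validators_results : List (String × String × String)), Dom_combine_decisions validators_results → Spec_combine_decisions validators_results (combine_decisions validators_results)

-- ===== LEMMAS AND PROOFS =====

-- A's loop computes the map of decisions and of formatted reasons
theorem foldA_eq (vrs : List (String × String × String)) (acc : List String × List String) :
    vrs.foldl (fun (acc : List String × List String) t =>
      (acc.1 ++ [t.2.1], acc.2 ++ ["[" ++ t.1 ++ "] " ++ t.2.2])) acc
    = (acc.1 ++ vrs.map (fun t => t.2.1),
       acc.2 ++ vrs.map (fun t => "[" ++ t.1 ++ "] " ++ t.2.2)) := by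
  induction vrs generalizing acc with
  | nil => simp
  | cons h tl ih => simp [List.foldl, ih]

-- B's maximum severity in closed form: 3 iff a deny exists, else 2 iff an ask exists,
-- else 1 iff a non-allow exists, else 0
theorem sev_char (vrs : List (String × String × String)) :
    (vrs.map (fun t => pvRank t.2.1)).foldr Nat.max 0
    = (if vrs.any (fun t => t.2.1 == "deny") then 3
       else if vrs.any (fun t => t.2.1 == "ask") then 2
       else if vrs.any (fun t => !(t.2.1 == "allow")) then 1 else 0) := by
  induction vrs with
  | nil => rfl
  | cons h tl ih =>
      simp only [List.map_cons, List.foldr_cons, List.any_cons, ih]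
      by_cases hd : h.2.1 = "deny"
      · by_cases t1 : (tl.any fun t => t.2.1 == "deny") = true <;>
          by_cases t2 : (tl.any fun t => t.2.1 == "ask") = true <;>
          by_cases t3 : (tl.any fun t => !(t.2.1 == "allow")) = true <;>
          simp [pvRank, hd, t1, t2, t3]
      · have bd : (h.2.1 == "deny") = false := beq_eq_false_iff_ne.mpr hd
        by_cases ha : h.2.1 = "ask"
        · by_cases t1 : (tl.any fun t => t.2.1 == "deny") = true <;>
          by_cases t2 : (tl.any fun t => t.2.1 == "ask") = true <;>
          by_cases t3 : (tl.any fun t => !(t.2.1 == "allow")) = true <;>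
          simp [pvRank, ha, t1, t2, t3]
        · have ba : (h.2.1 == "ask") = false := beq_eq_false_iff_ne.mpr ha
          by_cases hw : h.2.1 = "allow"
          · by_cases t1 : (tl.any fun t => t.2.1 == "deny") = true <;>
          by_cases t2 : (tl.any fun t => t.2.1 == "ask") = true <;>
          by_cases t3 : (tl.any fun t => !(t.2.1 == "allow")) = true <;>
          simp [pvRank, hw, t1, t2, t3]
          · have bw : (h.2.1 == "allow") = false := beq_eq_false_iff_ne.mpr hw
            by_cases t1 : (tl.any fun t => t.2.1 == "deny") = true <;>
          by_cases t2 : (tl.any fun t => t.2.1 == "ask") = true <;>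
          by_cases t3 : (tl.any fun t => !(t.2.1 == "allow")) = true <;>
          simp [pvRank, bd, ba, bw, t1, t2, t3]

theorem contains_map_deny (vrs : List (String × String × String)) :
    (vrs.map (fun t => t.2.1)).contains "deny" = vrs.any (fun t => t.2.1 == "deny") := by
  induction vrs with
  | nil => rfl
  | cons h tl ih =>
      simp only [List.map_cons, List.contains_cons, List.any_cons, ih]
      by_cases hd : h.2.1 = "deny"
      · simp [hd]
      · simp [beq_eq_false_iff_ne.mpr (fun h' => hd h'.symm), beq_eq_false_iff_ne.mpr hd]

theorem filter_ne_nil_any (vrs : List (String × String × String)) (p : (String × String × String) → Bool) :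
    ((vrs.filter p).map (fun t => t.2.2) ≠ []) ↔ vrs.any p = true := by
  simp [List.filter_eq_nil_iff, List.any_eq_true]

theorem combine_eq (vrs : List (String × String × String)) :
    combine_decisions vrs = combine_decisions_alt vrs := by
  unfold combine_decisions combine_decisions_alt
  simp only [foldA_eq, sev_char, List.nil_append, contains_map_deny, List.all_map,
    Function.comp_def]
  by_cases hd : vrs.any (fun t => t.2.1 == "deny") = true
  · simp [hd]
  · simp only [Bool.not_eq_true] at hd
    by_cases ha : vrs.any (fun t => t.2.1 == "ask") = true
    · have hall : vrs.all (fun t => t.2.1 == "allow") = false := by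
        rcases List.any_eq_true.mp ha with ⟨x, hx, hp⟩
        refine List.all_eq_false.mpr ⟨x, hx, ?_⟩
        have hx2 := beq_iff_eq.mp hp
        rw [hx2]; decide
      have hne := (filter_ne_nil_any vrs (fun t => t.2.1 == "ask")).mpr ha
      simp [hd, ha, hall, hne]
    · simp only [Bool.not_eq_true] at ha
      have hempty : (vrs.filter (fun t => t.2.1 == "ask")).map (fun t => t.2.2) = [] := by
        by_contra hc
        have := (filter_ne_nil_any vrs (fun t => t.2.1 == "ask")).mp hc
        simp [ha] at this
      by_cases hw : vrs.any (fun t => !(t.2.1 == "allow")) = true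
      · have hall : vrs.all (fun t => t.2.1 == "allow") = false := by
          rcases List.any_eq_true.mp hw with ⟨x, hx, hp⟩
          exact List.all_eq_false.mpr ⟨x, hx, by simpa using hp⟩
        simp [hd, ha, hw, hall, hempty]
      · simp only [Bool.not_eq_true] at hw
        have hall : vrs.all (fun t => t.2.1 == "allow") = true := by
          refine List.all_eq_true.mpr fun x hx => ?_
          have := List.any_eq_false.mp hw x hx
          simpa using this
        simp [hd, ha, hw, hall]

-- ===== VERDICT (by name: the statement is the Claim_ definition above) =====
theorem combine_decisions_spec : Claim_equal_combine_decisions := by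
  intro vrs _
  unfold Spec_combine_decisions
  exact combine_eq vrs
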